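-- pv_equiv track=rewrite | github.com/26shyamaladevi/apriori_csu | main.py | remove_subsets
-- ===== SOURCE A (Python) =====
-- def remove_subsets(v):
--     no_of_items = 0
--     final_result_list = []
--     if(len(v)!=0):
--
--         for k in range(len(v) - 1):
--             out_sub_list = []
--             for item in v[k]:
--                 exist = 0
--                 for rep in range(k + 1, len(v)):
--                     for co in v[rep]:
--                         if set(item).issubset(set(co)):
--                             exist = 1
--                 if (exist == 0):
--                     out_sub_list.append(item)
--                     no_of_items += 1
--             final_result_list.append(out_sub_list)
--         final_result_list.append(v[len(v) - 1])
--         no_of_items += len(v[len(v) - 1])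
--     no_of_items_str = "\n\nEnd - Total number of items: " + str(no_of_items)
--     total_result_set = export_result(final_result_list)
--     total_result_set += no_of_items_str
--     return total_result_set
--
-- def export_result(result_array):
--     total_result_set = ""
--     total_result_set += "{ "
--     for frequent_item in result_array:
--         for item in frequent_item:
--             total_result_set += "{ "
--             f = ""
--             new_item_list = []
--             for i in range(len(list(item))):
--                 new_item_list.append(list(item)[i])
--             new_item_list.sort()
--             for i in range(len(new_item_list)):
--                 f += str(new_item_list[i])
--                 if (i != len(new_item_list) - 1):
--                     f += " , "
--             total_result_set += f
--             total_result_set += " }"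
--     total_result_set += " }"
--     return total_result_set
-- ===== SOURCE B (Python) =====
-- def remove_subsets(v):
--     # One reverse pass: keep an itemset iff it is a subset of no itemset in a later
--     # sublist, maintained incrementally in a pool of the later itemsets (built as sets once).
--     pool = []
--     kept_rev = []
--     count = 0
--     for sub in reversed(v):
--         kept = [it for it in sub if not any(set(it).issubset(s) for s in pool)]
--         count += len(kept)
--         kept_rev.append(kept)
--         for s in sub:
--             pool.append(set(s))
--     out = "{ "
--     for sub in reversed(kept_rev):
--         for it in sub:
--             xs = sorted(it)
--             if not xs:
--                 out += "{ "
--             else: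
--                 acc = out + "{ " + str(xs[0])
--                 for x in xs[1:]:
--                     acc += " , " + str(x)
--                 out = acc
--             out += " }"
--     out = out + " }"
--     return out + "\n\nEnd - Total number of items: " + str(count)
-- ===== Notes on version B (the rewrite author's own statement) =====
-- stated objective: alternative
-- what changed: Replaces A's per-item rescan of all later sublists (rebuilding set(co) for every item/itemset pair) by a single reverse pass that incrementally maintains a pool of the later itemsets, each converted to a set exactly once, and formats the output by direct accumulation instead of export_result's index loop.
import Mathlib
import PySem

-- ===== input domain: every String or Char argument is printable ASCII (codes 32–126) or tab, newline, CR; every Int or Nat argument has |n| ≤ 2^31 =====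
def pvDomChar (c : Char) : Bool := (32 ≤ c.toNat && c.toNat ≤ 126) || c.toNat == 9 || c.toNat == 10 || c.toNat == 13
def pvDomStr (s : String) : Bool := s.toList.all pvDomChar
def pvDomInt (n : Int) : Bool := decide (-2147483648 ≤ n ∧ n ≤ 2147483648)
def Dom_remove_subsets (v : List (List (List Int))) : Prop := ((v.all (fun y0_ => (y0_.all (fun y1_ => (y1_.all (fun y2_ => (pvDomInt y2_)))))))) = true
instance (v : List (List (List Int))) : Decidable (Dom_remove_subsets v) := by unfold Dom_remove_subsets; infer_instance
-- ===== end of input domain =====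

-- B replaces A's per-item rescans of all later sublists by ONE reverse pass that maintains a pool
-- of the later itemsets (as sets, built once); same return value, different decomposition.

-- ===== PORT A =====
-- set(item).issubset(set(co))
def pvIssub (item co : List Int) : Bool :=
  PySem.Set.issubset (PySem.Set.ofList item) (PySem.Set.ofList co)

-- exist flag: for rep in range(k+1, len(v)): for co in v[rep]: if issubset: exist = 1
def pvExistA (item : List Int) (rest : List (List (List Int))) : Int :=
  rest.foldl (fun e sub => sub.foldl (fun e co => if pvIssub item co then 1 else e) e) 0

-- the k-loop over v (rest = v[k+1:]) plus the unconditional append of v[-1]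
def pvGoA : List (List (List Int)) → List (List (List Int)) × Int
  | [] => ([], 0)
  | [last] => ([last], (last.length : Int))
  | sub :: rest@(_ :: _) =>
      let p := sub.foldl (fun (acc : List (List Int) × Int) item =>
          if pvExistA item rest = 0 then (acc.1 ++ [item], acc.2 + 1) else acc) ([], 0)
      let q := pvGoA rest
      (p.1 :: q.1, p.2 + q.2)

-- inner loop of export_result: f built over range(len(new_item_list))
def pvFmtA (item : List Int) : String :=
  (List.range (PySem.List.sorted item (fun x => x) false).length).foldl
    (fun f i => (f ++ PySem.Int.toStr ((PySem.List.sorted item (fun x => x) false).getD i 0)) ++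
      (if i ≠ (PySem.List.sorted item (fun x => x) false).length - 1 then " , " else "")) ""

def pvExportA (ra : List (List (List Int))) : String :=
  (ra.foldl (fun t sub => sub.foldl (fun t item => ((t ++ "{ ") ++ pvFmtA item) ++ " }") t) "{ ") ++ " }"

def remove_subsets (v : List (List (List Int))) : String :=
  let r := if v.length ≠ 0 then pvGoA v else ([], 0)
  pvExportA r.1 ++ ("\n\nEnd - Total number of items: " ++ PySem.Int.toStr r.2)

-- ===== PORT B =====
-- not any(set(it).issubset(s) for s in pool)
def pvKeepB (pool : List (PySem.Set Int)) (it : List Int) : Bool :=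
  ! pool.any (fun s => PySem.Set.issubset (PySem.Set.ofList it) s)

def remove_subsets_alt (v : List (List (List Int))) : String :=
  -- reverse pass maintaining (pool, kept_rev, count)
  let st := v.reverse.foldl
    (fun (st : List (PySem.Set Int) × List (List (List Int)) × Int) sub =>
      let kept := sub.filter (pvKeepB st.1)
      (sub.foldl (fun p s => p ++ [PySem.Set.ofList s]) st.1,
       st.2.1 ++ [kept],
       st.2.2 + (kept.length : Int)))
    ([], [], 0)
  -- formatting pass over reversed(kept_rev)
  let out := st.2.1.reverse.foldl
    (fun out sub => sub.foldl
      (fun out it =>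
        (match PySem.List.sorted it (fun x => x) false with
          | [] => out ++ "{ "
          | x :: r => r.foldl (fun s y => s ++ (" , " ++ PySem.Int.toStr y)) ((out ++ "{ ") ++ PySem.Int.toStr x)) ++ " }") out)
    "{ "
  (out ++ " }") ++ ("\n\nEnd - Total number of items: " ++ PySem.Int.toStr st.2.2)

-- ===== PRECONDITION & SPEC =====
def Spec_remove_subsets (v : List (List (List Int))) (out : String) : Prop := out = remove_subsets_alt v
instance (v : List (List (List Int))) (out : String) : Decidable (Spec_remove_subsets v out) := by unfold Spec_remove_subsets; infer_instance

-- ===== CLAIM (what is proved, stated in full; the proofs are below) =====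
def Claim_equal_remove_subsets : Prop := ∀ (v : List (List (List Int))), Dom_remove_subsets v → Spec_remove_subsets v (remove_subsets v)

-- ===== LEMMAS AND PROOFS =====

-- shared specification of the two algorithms
def keepSpec (rest : List (List (List Int))) (it : List Int) : Bool :=
  ! rest.any (fun sub => sub.any (fun co => pvIssub it co))

def resSpec : List (List (List Int)) → List (List (List Int))
  | [] => []
  | sub :: rest => sub.filter (keepSpec rest) :: resSpec rest

def cntSpec (v : List (List (List Int))) : Int :=
  ((resSpec v).map (fun s => (s.length : Int))).sum

theorem my_foldl_congr {α β : Type} {l : List α} {f g : β → α → β} (init : β)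
    (h : ∀ acc x, x ∈ l → f acc x = g acc x) : l.foldl f init = l.foldl g init := by
  induction l generalizing init with
  | nil => rfl
  | cons x t ih =>
      rw [List.foldl_cons, List.foldl_cons, h init x (by simp)]
      exact ih _ (fun acc y hy => h acc y (by simp [hy]))

theorem my_foldl_app_map {α β : Type} (f : α → β) (l : List α) (acc : List β) :
    l.foldl (fun p s => p ++ [f s]) acc = acc ++ l.map f := by
  induction l generalizing acc with
  | nil => simp
  | cons x t ih => simp [ih]

-- A's exist flag computes "any subset witness among the later sublists"
theorem foldl_if_one {α : Type} (p : α → Bool) (l : List α) (e : Int) :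
    l.foldl (fun e x => if p x then (1:Int) else e) e = if l.any p then 1 else e := by
  induction l generalizing e with
  | nil => simp
  | cons x t ih => by_cases h : p x <;> simp [h, ih]

theorem existA_eq (it : List Int) (rest : List (List (List Int))) :
    pvExistA it rest = if rest.any (fun sub => sub.any (fun co => pvIssub it co)) then 1 else 0 := by
  unfold pvExistA
  have h1 : rest.foldl (fun e sub => sub.foldl (fun e co => if pvIssub it co then (1:Int) else e) e) 0
      = rest.foldl (fun e sub => if sub.any (fun co => pvIssub it co) then (1:Int) else e) 0 :=
    my_foldl_congr _ (fun acc x _ => foldl_if_one _ _ _)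
  rw [h1]; exact foldl_if_one _ _ _

theorem existA_zero_iff (it : List Int) (rest : List (List (List Int))) :
    (pvExistA it rest = 0) ↔ keepSpec rest it = true := by
  rw [existA_eq]; unfold keepSpec
  by_cases h : rest.any (fun sub => sub.any (fun co => pvIssub it co)) <;> simp [h]

-- A's filter loop over one sublist
theorem goA_filter (rest : List (List (List Int))) (sub : List (List Int))
    (l : List (List Int)) (c : Int) :
    sub.foldl (fun (acc : List (List Int) × Int) item =>
        if pvExistA item rest = 0 then (acc.1 ++ [item], acc.2 + 1) else acc) (l, c)
    = (l ++ sub.filter (keepSpec rest), c + ((sub.filter (keepSpec rest)).length : Int)) := by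
  induction sub generalizing l c with
  | nil => simp
  | cons x t ih =>
      by_cases h : keepSpec rest x
      · have h0 : pvExistA x rest = 0 := (existA_zero_iff x rest).mpr h
        simp only [List.foldl_cons, if_pos h0, ih, List.filter_cons, h]
        simp; omega
      · have h0 : ¬ pvExistA x rest = 0 := by
          rw [existA_zero_iff]; simp [h]
        simp only [List.foldl_cons, if_neg h0, ih, List.filter_cons]
        simp [h]

theorem goA_eq (v : List (List (List Int))) : pvGoA v = (resSpec v, cntSpec v) := by
  induction v with
  | nil => simp [pvGoA, resSpec, cntSpec]
  | cons sub rest ih =>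
      cases rest with
      | nil =>
          have hf : List.filter (keepSpec []) sub = sub :=
            List.filter_eq_self.mpr (by intro x _; simp [keepSpec])
          simp [pvGoA, resSpec, cntSpec, hf]
      | cons r rs =>
          simp only [pvGoA, goA_filter, ih, resSpec, cntSpec, List.map_cons, List.sum_cons]
          simp

-- B's reverse pass computes (pool of later itemsets, resSpec reversed, the same count)
theorem goB_eq (v : List (List (List Int))) :
    v.reverse.foldl
      (fun (st : List (PySem.Set Int) × List (List (List Int)) × Int) sub =>
        let kept := sub.filter (pvKeepB st.1)
        (sub.foldl (fun p s => p ++ [PySem.Set.ofList s]) st.1,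
         st.2.1 ++ [kept],
         st.2.2 + (kept.length : Int)))
      ([], [], 0)
    = (v.reverse.flatMap (fun sub => sub.map PySem.Set.ofList), (resSpec v).reverse, cntSpec v) := by
  rw [List.foldl_reverse]
  induction v with
  | nil => simp [resSpec, cntSpec]
  | cons sub rest ih =>
      simp only [List.foldr_cons, ih]
      have hkeep : ∀ it : List Int,
          pvKeepB (rest.reverse.flatMap (fun sub => sub.map PySem.Set.ofList)) it
            = keepSpec rest it := by
        intro it; unfold pvKeepB keepSpec pvIssub; simp [Function.comp_def]
      have hfilter : sub.filter (pvKeepB (rest.reverse.flatMap (fun sub => sub.map PySem.Set.ofList)))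
          = sub.filter (keepSpec rest) := List.filter_congr (fun x _ => hkeep x)
      have hpool : sub.foldl (fun p s => p ++ [PySem.Set.ofList s])
            (rest.reverse.flatMap (fun sub => sub.map PySem.Set.ofList))
          = (rest.reverse.flatMap (fun sub => sub.map PySem.Set.ofList)) ++ sub.map PySem.Set.ofList :=
        my_foldl_app_map _ _ _
      simp only [hfilter, hpool]
      refine Prod.ext ?_ (Prod.ext ?_ ?_)
      · simp [List.reverse_cons, List.flatMap_append]
      · simp [resSpec]
      · simp only [cntSpec, resSpec, List.map_cons, List.sum_cons]; omega

-- string lemmas ------------------------------------------------------------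

-- a string fold that only appends factors out its initial value
theorem foldl_str_append {β : Type} (g : β → String) (l : List β) (s : String) :
    l.foldl (fun f x => f ++ g x) s = s ++ l.foldl (fun f x => f ++ g x) "" := by
  induction l generalizing s with
  | nil => simp
  | cons x t ih => rw [List.foldl_cons, List.foldl_cons, ih, ih ("" ++ g x)]; simp [String.append_assoc]

def fmtHead (s : String) : List Int → String
  | [] => s
  | x :: r => r.foldl (fun a y => a ++ (" , " ++ PySem.Int.toStr y)) (s ++ PySem.Int.toStr x)

theorem fmtHead_concat (s : String) (init : List Int) (l : Int) :
    fmtHead s (init ++ [l]) =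
      (match init with
        | [] => s ++ PySem.Int.toStr l
        | _ :: _ => fmtHead s init ++ (" , " ++ PySem.Int.toStr l)) := by
  cases init with
  | nil => simp [fmtHead]
  | cons x r => simp [fmtHead, List.foldl_append]

theorem getD_concat_last (init : List Int) (l : Int) :
    (init ++ [l]).getD init.length 0 = l := by
  simp [List.getD]

theorem getD_concat_lt (init : List Int) (l : Int) (i : Nat) (h : i < init.length) :
    (init ++ [l]).getD i 0 = init.getD i 0 := by
  simp [List.getD, List.getElem?_append_left h]

-- the range-indexed separator loop with ALL separators
theorem alwaysFold_eq (init : List Int) (s : String) :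
    (List.range init.length).foldl
        (fun f i => (f ++ PySem.Int.toStr (init.getD i 0)) ++ " , ") s
      = (match init with
          | [] => s
          | _ :: _ => fmtHead s init ++ " , ") := by
  induction init using List.reverseRecOn generalizing s with
  | nil => simp
  | append_singleton init l ih =>
      rw [List.length_append, List.length_singleton, List.range_succ, List.foldl_append]
      have hpre : (List.range init.length).foldl
            (fun f i => (f ++ PySem.Int.toStr ((init ++ [l]).getD i 0)) ++ " , ") s
          = (List.range init.length).foldl
            (fun f i => (f ++ PySem.Int.toStr (init.getD i 0)) ++ " , ") s :=
        my_foldl_congr _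
          (by intro acc i hi; rw [getD_concat_lt init l i (List.mem_range.mp hi)])
      rw [hpre, ih s]
      cases init with
      | nil => simp [fmtHead]
      | cons x r =>
          simp only [List.foldl_cons, List.foldl_nil, getD_concat_last, fmtHead_concat]
          simp [String.append_assoc]

-- A's item-formatting loop equals B's head-then-separators loop
theorem fmt_loop_eq (xs : List Int) (s : String) :
    (List.range xs.length).foldl
        (fun f i => (f ++ PySem.Int.toStr (xs.getD i 0)) ++ (if i ≠ xs.length - 1 then " , " else "")) s
      = fmtHead s xs := by
  induction xs using List.reverseRecOn generalizing s with
  | nil => simp [fmtHead]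
  | append_singleton init l _ =>
      rw [List.length_append, List.length_singleton, List.range_succ, List.foldl_append]
      have hpre : (List.range init.length).foldl
            (fun f i => (f ++ PySem.Int.toStr ((init ++ [l]).getD i 0)) ++
              (if i ≠ init.length + 1 - 1 then " , " else "")) s
          = (List.range init.length).foldl
            (fun f i => (f ++ PySem.Int.toStr (init.getD i 0)) ++ " , ") s :=
        my_foldl_congr _
          (by intro acc i hi
              have hi' := List.mem_range.mp hi
              rw [getD_concat_lt init l i hi', if_pos (by omega)])
      rw [hpre, alwaysFold_eq init s]
      cases init with
      | nil => simp [fmtHead]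
      | cons x r =>
          simp only [List.foldl_cons, List.foldl_nil, getD_concat_last, fmtHead_concat]
          simp [String.append_assoc]

-- one item: "{ " + f from export_result equals B's direct accumulation
theorem item_eq (t : String) (it : List Int) :
    (t ++ "{ ") ++ pvFmtA it = fmtHead (t ++ "{ ") (PySem.List.sorted it (fun x => x) false) := by
  unfold pvFmtA
  have e1 : (List.range (PySem.List.sorted it (fun x => x) false).length).foldl
        (fun f i => (f ++ PySem.Int.toStr ((PySem.List.sorted it (fun x => x) false).getD i 0)) ++
          (if i ≠ (PySem.List.sorted it (fun x => x) false).length - 1 then " , " else "")) ""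
      = (List.range (PySem.List.sorted it (fun x => x) false).length).foldl
        (fun f i => f ++ (PySem.Int.toStr ((PySem.List.sorted it (fun x => x) false).getD i 0) ++
          (if i ≠ (PySem.List.sorted it (fun x => x) false).length - 1 then " , " else ""))) "" :=
    my_foldl_congr _ (by intro acc i _; rw [String.append_assoc])
  have e3 : (List.range (PySem.List.sorted it (fun x => x) false).length).foldl
        (fun f i => f ++ (PySem.Int.toStr ((PySem.List.sorted it (fun x => x) false).getD i 0) ++
          (if i ≠ (PySem.List.sorted it (fun x => x) false).length - 1 then " , " else ""))) (t ++ "{ ")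
      = (List.range (PySem.List.sorted it (fun x => x) false).length).foldl
        (fun f i => (f ++ PySem.Int.toStr ((PySem.List.sorted it (fun x => x) false).getD i 0)) ++
          (if i ≠ (PySem.List.sorted it (fun x => x) false).length - 1 then " , " else "")) (t ++ "{ ") :=
    my_foldl_congr _ (by intro acc i _; rw [String.append_assoc])
  rw [e1, ← foldl_str_append, e3, fmt_loop_eq]

-- whole-output formatting: A's export_result equals B's direct string accumulation
theorem export_eq (ra : List (List (List Int))) :
    pvExportA ra =
      (ra.foldl (fun out sub => sub.foldl
        (fun out it =>
          (match PySem.List.sorted it (fun x => x) false with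
            | [] => out ++ "{ "
            | x :: r => r.foldl (fun s y => s ++ (" , " ++ PySem.Int.toStr y)) ((out ++ "{ ") ++ PySem.Int.toStr x)) ++ " }") out) "{ ") ++ " }" := by
  unfold pvExportA
  congr 1
  apply my_foldl_congr
  intro acc sub _
  apply my_foldl_congr
  intro t it _
  rw [item_eq]
  cases hxs : PySem.List.sorted it (fun x => x) false with
  | nil => simp [fmtHead]
  | cons x r => simp [fmtHead]

theorem if_goA (v : List (List (List Int))) :
    (if v.length ≠ 0 then pvGoA v else ([], 0)) = pvGoA v := by
  cases v <;> simp [pvGoA]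

-- ===== VERDICT (by name: the statement is the Claim_ definition above) =====
theorem remove_subsets_spec : Claim_equal_remove_subsets := by
  intro v _
  unfold Spec_remove_subsets remove_subsets remove_subsets_alt
  rw [if_goA]
  simp only [goA_eq, goB_eq, List.reverse_reverse, export_eq]
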